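-- pv_equiv track=rewrite | github.com/amol-ship-it/agi-core | domains/arc/objects.py | _has_hole
-- ===== SOURCE A (Python) =====
-- def _has_hole(shape: dict) -> bool:
--     """Check if shape has an enclosed hole via flood fill from border."""
--     sg = shape["subgrid"]
--     h, w = len(sg), len(sg[0]) if sg else 0
--     if h <= 2 or w <= 2:
--         return False
--     visited = [[False] * w for _ in range(h)]
--     queue = []
--     for r in range(h):
--         for c in range(w):
--             if (r == 0 or r == h - 1 or c == 0 or c == w - 1) and sg[r][c] == 0:
--                 visited[r][c] = True
--                 queue.append((r, c))
--     while queue: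
--         r, c = queue.pop()
--         for dr, dc in [(-1, 0), (1, 0), (0, -1), (0, 1)]:
--             nr, nc = r + dr, c + dc
--             if 0 <= nr < h and 0 <= nc < w and not visited[nr][nc] and sg[nr][nc] == 0:
--                 visited[nr][nc] = True
--                 queue.append((nr, nc))
--     return any(sg[r][c] == 0 and not visited[r][c]
--                for r in range(h) for c in range(w))
-- ===== SOURCE B (Python) =====
-- def _has_hole(shape: dict) -> bool:
--     """Check for an enclosed hole by saturating the set of border-connected
--     background cells with bounded relaxation sweeps (no stack/queue)."""
--     sg = shape["subgrid"]
--     h = len(sg)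
--     w = len(sg[0]) if sg else 0
--     if h <= 2 or w <= 2:
--         return False
--     reach = set()
--     for _ in range(h * w + 1):
--         for r in range(h):
--             for c in range(w):
--                 if sg[r][c] == 0 and (r, c) not in reach and (
--                         r == 0 or r == h - 1 or c == 0 or c == w - 1
--                         or (r - 1, c) in reach or (r + 1, c) in reach
--                         or (r, c - 1) in reach or (r, c + 1) in reach):
--                     reach.add((r, c))
--     return any(sg[r][c] == 0 and (r, c) not in reach
--                for r in range(h) for c in range(w))
-- ===== Notes on version B (the rewrite author's own statement) =====
-- stated objective: alternative
-- what changed: Replaces the explicit stack-based flood fill (visited matrix + DFS queue) by a worklist-free fixpoint computation: a set of border-connected background cells saturated by bounded whole-grid relaxation sweeps.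
import Mathlib
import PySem

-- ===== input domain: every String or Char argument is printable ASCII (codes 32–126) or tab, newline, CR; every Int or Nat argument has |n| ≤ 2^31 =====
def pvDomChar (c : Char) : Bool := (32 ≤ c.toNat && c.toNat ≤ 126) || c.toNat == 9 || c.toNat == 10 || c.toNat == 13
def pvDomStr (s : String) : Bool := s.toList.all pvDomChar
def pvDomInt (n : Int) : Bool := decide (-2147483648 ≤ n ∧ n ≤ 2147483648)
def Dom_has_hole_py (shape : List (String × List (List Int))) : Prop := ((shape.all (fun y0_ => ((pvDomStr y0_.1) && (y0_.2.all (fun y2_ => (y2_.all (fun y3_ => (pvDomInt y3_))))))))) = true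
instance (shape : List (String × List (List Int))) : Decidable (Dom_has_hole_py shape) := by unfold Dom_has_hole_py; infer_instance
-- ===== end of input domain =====

-- B replaces A's stack flood fill by a fixpoint saturation with whole-grid relaxation sweeps
-- (alternative decomposition, not faster).

-- ===== PORT A =====
-- sg[r][c]; A only evaluates it with 0 ≤ r < len(sg) and 0 ≤ c < len(sg[r]) (exact there)
def hhGetA (sg : List (List Int)) (r c : Int) : Int :=
  (sg.getD r.toNat []).getD c.toNat 0

-- visited[r][c] read / write; A only uses them with 0 ≤ r, 0 ≤ c (exact there)
def hhVGet (v : List (List Bool)) (r c : Int) : Bool :=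
  (v.getD r.toNat []).getD c.toNat false

def hhVSet (v : List (List Bool)) (r c : Int) : List (List Bool) :=
  v.set r.toNat ((v.getD r.toNat []).set c.toNat true)

def hhDirs : List (Int × Int) := [(-1, 0), (1, 0), (0, -1), (0, 1)]

-- the body of A's inner 'for dr, dc' loop, for one neighbour n
def hhRelaxA (sg : List (List Int)) (h w : Int)
    (st : List (List Bool) × List (Int × Int)) (n : Int × Int) :
    List (List Bool) × List (Int × Int) :=
  if 0 ≤ n.1 ∧ n.1 < h ∧ 0 ≤ n.2 ∧ n.2 < w ∧
      hhVGet st.1 n.1 n.2 = false ∧ hhGetA sg n.1 n.2 = 0 then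
    (hhVSet st.1 n.1 n.2, n :: st.2)
  else st

-- A's border-seeding double loop (queue as a Lean stack: cons = Python's append-at-end, head = pop-at-end)
def hhInitA (sg : List (List Int)) (h w : Int) : List (List Bool) × List (Int × Int) :=
  (PySem.List.pyRange 0 h 1).foldl (fun st r =>
    (PySem.List.pyRange 0 w 1).foldl (fun st c =>
      if (r = 0 ∨ r = h - 1 ∨ c = 0 ∨ c = w - 1) ∧ hhGetA sg r c = 0 then
        (hhVSet st.1 r c, (r, c) :: st.2)
      else st) st)
    (List.replicate h.toNat (List.replicate w.toNat false), [])

-- A's 'while queue' loop; fuel is only a totality guard, proved below never to run out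
def hhLoopA (sg : List (List Int)) (h w : Int) :
    Nat → List (List Bool) → List (Int × Int) → List (List Bool)
  | _, v, [] => v
  | 0, v, _ :: _ => v
  | fuel + 1, v, (r, c) :: q =>
      let st := hhDirs.foldl (fun st d => hhRelaxA sg h w st (r + d.1, c + d.2)) (v, q)
      hhLoopA sg h w fuel st.1 st.2

def has_hole_py (shape : List (String × List (List Int))) : Bool :=
  let sg := ((shape.find? (fun p => p.1 == "subgrid")).map (·.2)).getD []  -- KeyError excluded by Pre_
  let h : Int := sg.length
  let w : Int := if sg ≠ [] then (sg.headD []).length else 0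
  if h ≤ 2 ∨ w ≤ 2 then false
  else
    let st0 := hhInitA sg h w
    let v := hhLoopA sg h w (2 * h.toNat * w.toNat + 1) st0.1 st0.2
    (PySem.List.pyRange 0 h 1).any fun r =>
      (PySem.List.pyRange 0 w 1).any fun c =>
        hhGetA sg r c == 0 && !hhVGet v r c

-- ===== PORT B =====
def hhGetB (sg : List (List Int)) (r c : Int) : Int :=
  (sg.getD r.toNat []).getD c.toNat 0

-- the condition of B's innermost 'if'
def hhCondB (sg : List (List Int)) (h w : Int) (S : PySem.Set (Int × Int)) (r c : Int) : Bool :=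
  hhGetB sg r c == 0 && !(PySem.Set.contains S (r, c)) &&
    (r == 0 || r == h - 1 || c == 0 || c == w - 1 ||
     PySem.Set.contains S (r - 1, c) || PySem.Set.contains S (r + 1, c) ||
     PySem.Set.contains S (r, c - 1) || PySem.Set.contains S (r, c + 1))

-- one full raster sweep over the grid
def hhSweepB (sg : List (List Int)) (h w : Int) (S : PySem.Set (Int × Int)) :
    PySem.Set (Int × Int) :=
  (PySem.List.pyRange 0 h 1).foldl (fun S r =>
    (PySem.List.pyRange 0 w 1).foldl (fun S c =>
      if hhCondB sg h w S r c then PySem.Set.add S (r, c) else S) S) S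

def has_hole_py_alt (shape : List (String × List (List Int))) : Bool :=
  let sg := ((shape.find? (fun p => p.1 == "subgrid")).map (·.2)).getD []  -- KeyError excluded by Pre_
  let h : Int := sg.length
  let w : Int := if sg ≠ [] then (sg.headD []).length else 0
  if h ≤ 2 ∨ w ≤ 2 then false
  else
    let S := (PySem.List.pyRange 0 (h * w + 1) 1).foldl
      (fun S _ => hhSweepB sg h w S) PySem.Set.empty
    (PySem.List.pyRange 0 h 1).any fun r =>
      (PySem.List.pyRange 0 w 1).any fun c =>
        hhGetB sg r c == 0 && !(PySem.Set.contains S (r, c))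

-- ===== PRECONDITION & SPEC =====
-- Pre_ excludes exactly the inputs where Python A raises: a missing "subgrid" key (KeyError) and,
-- when the grid has more than 2 rows and columns, a row shorter than the first row (IndexError).
def Pre_has_hole_py (shape : List (String × List (List Int))) : Prop :=
  (shape.find? (fun p => p.1 == "subgrid")).isSome ∧
  (let sg := ((shape.find? (fun p => p.1 == "subgrid")).map (·.2)).getD []
   sg.length ≤ 2 ∨ (sg.headD []).length ≤ 2 ∨ ∀ row ∈ sg, (sg.headD []).length ≤ row.length)
instance (shape : List (String × List (List Int))) : Decidable (Pre_has_hole_py shape) := by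
  unfold Pre_has_hole_py; infer_instance

def pvWitness_has_hole_py : (List (String × List (List Int))) :=
  [("subgrid", [[1, 1, 1], [1, 0, 1], [1, 1, 1]])]

def Spec_has_hole_py (shape : List (String × List (List Int))) (out : Bool) : Prop := out = has_hole_py_alt shape
instance (shape : List (String × List (List Int))) (out : Bool) : Decidable (Spec_has_hole_py shape out) := by unfold Spec_has_hole_py; infer_instance

-- ===== CLAIM (what is proved, stated in full; the proofs are below) =====
def Claim_equal_has_hole_py : Prop := ∀ (shape : List (String × List (List Int))), Dom_has_hole_py shape → Pre_has_hole_py shape → Spec_has_hole_py shape (has_hole_py shape)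

-- ===== LEMMAS AND PROOFS =====

-- in-range cell
def hhInR (h w r c : Int) : Prop := 0 ≤ r ∧ r < h ∧ 0 ≤ c ∧ c < w

-- 4-adjacency
def hhAdj (r c r' c' : Int) : Prop :=
  (r' = r - 1 ∧ c' = c) ∨ (r' = r + 1 ∧ c' = c) ∨ (r' = r ∧ c' = c - 1) ∨ (r' = r ∧ c' = c + 1)

-- background cells connected to the border through background cells: what both programs compute
inductive HReach (sg : List (List Int)) (h w : Int) : Int → Int → Prop
  | border (r c : Int) : hhInR h w r c → (r = 0 ∨ r = h - 1 ∨ c = 0 ∨ c = w - 1) →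
      hhGetA sg r c = 0 → HReach sg h w r c
  | step (r c r' c' : Int) : HReach sg h w r c → hhAdj r c r' c' → hhInR h w r' c' →
      hhGetA sg r' c' = 0 → HReach sg h w r' c'

def hhCells (h w : Int) : List (Int × Int) :=
  (PySem.List.pyRange 0 h 1).flatMap fun r => (PySem.List.pyRange 0 w 1).map fun c => (r, c)

def hhUnvis (h w : Int) (v : List (List Bool)) : Nat :=
  ((hhCells h w).filter fun p => !hhVGet v p.1 p.2).length

def hhShape (h w : Int) (v : List (List Bool)) : Prop :=
  v.length = h.toNat ∧ ∀ row ∈ v, row.length = w.toNat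

theorem mem_hhCells (h w : Int) (p : Int × Int) :
    p ∈ hhCells h w ↔ hhInR h w p.1 p.2 := by
  obtain ⟨a, b⟩ := p
  simp [hhCells, hhInR, List.mem_flatMap, PySem.List.mem_pyRange_one, Prod.ext_iff]
  aesop

theorem nodup_hhCells (h w : Int) : (hhCells h w).Nodup := by
  unfold hhCells
  apply List.nodup_flatMap.mpr
  refine ⟨fun r _ => (PySem.List.nodup_pyRange_one 0 w).map
    (fun a b hab => by simpa using hab), ?_⟩
  refine (PySem.List.nodup_pyRange_one 0 h).imp ?_
  intro a b hab
  simp only [Function.onFun, List.disjoint_left]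
  rintro p hp hq
  simp only [List.mem_map] at hp hq
  obtain ⟨c1, _, rfl⟩ := hp
  obtain ⟨c2, _, h2⟩ := hq
  exact hab (by simpa using congrArg Prod.fst h2.symm) |>.elim

theorem length_hhCells (h w : Int) : (hhCells h w).length = h.toNat * w.toNat := by
  unfold hhCells
  rw [List.length_flatMap]
  simp [PySem.List.length_pyRange_one]

theorem getD_set_gen {α : Type} (l : List α) (i j : Nat) (x : α) (d : α) :
    (l.set i x).getD j d = if i = j ∧ i < l.length then x else l.getD j d := by
  rcases Nat.lt_or_ge i l.length with hi | hi
  · rcases eq_or_ne i j with rfl | hij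
    · simp [List.getD_eq_getElem?_getD, hi]
    · simp only [List.getD_eq_getElem?_getD, List.getElem?_set_ne hij]
      rw [if_neg (fun hh => hij hh.1)]
  · rw [List.set_eq_of_length_le hi, if_neg (fun hh => absurd hh.2 (Nat.not_lt.mpr hi))]

theorem getD_mem_of_lt {α : Type} (l : List α) (i : Nat) (d : α) (hi : i < l.length) :
    l.getD i d ∈ l := by
  rw [List.getD_eq_getElem?_getD, List.getElem?_eq_getElem hi]
  exact List.getElem_mem hi

theorem hhVGet_hhVSet_mono (v : List (List Bool)) (r c a b : Int)
    (hv : hhVGet v a b = true) : hhVGet (hhVSet v r c) a b = true := by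
  unfold hhVGet hhVSet at *
  rw [getD_set_gen]
  split_ifs with hij
  · rw [getD_set_gen]
    split_ifs with h2
    · rfl
    · rw [← hij.1] at hv; exact hv
  · exact hv

theorem hhVGet_hhVSet_ne (v : List (List Bool)) (r c a b : Int)
    (hne : a.toNat ≠ r.toNat ∨ b.toNat ≠ c.toNat) :
    hhVGet (hhVSet v r c) a b = hhVGet v a b := by
  unfold hhVGet hhVSet
  rw [getD_set_gen]
  split_ifs with hij
  · rw [getD_set_gen]
    rcases hne with hne | hne
    · exact absurd hij.1 (fun hh => hne hh.symm)
    · rw [if_neg (fun hh : c.toNat = b.toNat ∧ _ => hne hh.1.symm), ← hij.1]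
  · rfl

theorem hhVGet_hhVSet_self (h w : Int) (v : List (List Bool)) (r c : Int)
    (hs : hhShape h w v) (hr : hhInR h w r c) :
    hhVGet (hhVSet v r c) r c = true := by
  obtain ⟨hl, hrow⟩ := hs
  obtain ⟨h1, h2, h3, h4⟩ := hr
  have hrl : r.toNat < v.length := by omega
  have hcl : c.toNat < (v.getD r.toNat []).length := by
    rw [hrow _ (getD_mem_of_lt _ _ _ hrl)]; omega
  unfold hhVGet hhVSet
  rw [getD_set_gen, if_pos ⟨rfl, hrl⟩, getD_set_gen, if_pos ⟨rfl, hcl⟩]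

theorem hhShape_hhVSet (h w : Int) (v : List (List Bool)) (r c : Int)
    (hs : hhShape h w v) : hhShape h w (hhVSet v r c) := by
  obtain ⟨hl, hrow⟩ := hs
  refine ⟨by simpa [hhVSet] using hl, ?_⟩
  intro row hmem
  unfold hhVSet at hmem
  rcases Nat.lt_or_ge r.toNat v.length with hi | hi
  · rcases List.mem_or_eq_of_mem_set hmem with hm | rfl
    · exact hrow _ hm
    · simpa using hrow _ (getD_mem_of_lt _ _ _ hi)
  · rw [List.set_eq_of_length_le hi] at hmem
    exact hrow _ hmem

theorem getD_replicate_cases {α : Type} (n : Nat) (x : α) (i : Nat) (d : α) :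
    (List.replicate n x).getD i d = if i < n then x else d := by
  rcases Nat.lt_or_ge i n with hi | hi
  · rw [List.getD_eq_getElem?_getD]; simp [hi]
  · rw [if_neg (by omega)]; exact List.getD_eq_default _ _ (by simpa using hi)

theorem hhVGet_init (h' w' : Nat) (a b : Int) :
    hhVGet (List.replicate h' (List.replicate w' false)) a b = false := by
  unfold hhVGet
  rw [getD_replicate_cases]
  split_ifs
  · rw [getD_replicate_cases]; split_ifs <;> rfl
  · simp

theorem length_filter_flip {α : Type} (l : List α) (p : α) (f g : α → Bool)
    (hn : l.Nodup) (hp : p ∈ l) (hoff : ∀ q ∈ l, q ≠ p → f q = g q)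
    (hfp : f p = false) (hgp : g p = true) :
    (l.filter f).length + 1 = (l.filter g).length := by
  induction l with
  | nil => cases hp
  | cons a t ih =>
    rcases List.mem_cons.mp hp with hpa | hpt
    · subst hpa
      have hnot : p ∉ t := (List.nodup_cons.mp hn).1
      have heq : t.filter f = t.filter g :=
        List.filter_congr (fun q hq => hoff q (List.mem_cons_of_mem _ hq)
          (fun hh => hnot (hh ▸ hq)))
      simp [List.filter_cons, hfp, hgp, heq]
    · have hne : a ≠ p := fun hh => (List.nodup_cons.mp hn).1 (hh ▸ hpt)
      have hfa : f a = g a := hoff a (List.mem_cons_self) hne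
      have ih' := ih (List.nodup_cons.mp hn).2 hpt
        (fun q hq hqp => hoff q (List.mem_cons_of_mem _ hq) hqp)
      rw [List.filter_cons, List.filter_cons, hfa]
      cases hga : g a <;> simp <;> omega

theorem hhUnvis_hhVSet (h w : Int) (v : List (List Bool)) (r c : Int)
    (hs : hhShape h w v) (hr : hhInR h w r c) (hv : hhVGet v r c = false) :
    hhUnvis h w (hhVSet v r c) + 1 = hhUnvis h w v := by
  unfold hhUnvis
  apply length_filter_flip (hhCells h w) (r, c) _ _ (nodup_hhCells h w)
    ((mem_hhCells h w (r, c)).mpr hr)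
  · intro q hq hqp
    have hq' := (mem_hhCells h w q).mp hq
    have : q.1.toNat ≠ r.toNat ∨ q.2.toNat ≠ c.toNat := by
      rcases hr with ⟨_, _, _, _⟩; rcases hq' with ⟨_, _, _, _⟩
      have : q.1 ≠ r ∨ q.2 ≠ c := by
        by_contra hcon
        push_neg at hcon
        exact hqp (Prod.ext hcon.1 hcon.2)
      omega
    rw [hhVGet_hhVSet_ne v r c q.1 q.2 this]
  · simp [hhVGet_hhVSet_self h w v r c hs hr]
  · simp [hv]

theorem hhUnvis_le (h w : Int) (v : List (List Bool)) :
    hhUnvis h w v ≤ h.toNat * w.toNat := by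
  rw [← length_hhCells h w]
  exact List.length_filter_le _ _


theorem hhAdj_hhDirs (r c : Int) : ∀ d ∈ hhDirs, hhAdj r c (r + d.1) (c + d.2) := by
  intro d hd
  fin_cases hd <;> simp [hhAdj] <;> omega

theorem hhAdj_cover (r c r' c' : Int) (hadj : hhAdj r c r' c') :
    ∃ d ∈ hhDirs, r' = r + d.1 ∧ c' = c + d.2 := by
  rcases hadj with ⟨h1, h2⟩ | ⟨h1, h2⟩ | ⟨h1, h2⟩ | ⟨h1, h2⟩
  · exact ⟨(-1, 0), by simp [hhDirs], by omega, by omega⟩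
  · exact ⟨(1, 0), by simp [hhDirs], by omega, by omega⟩
  · exact ⟨(0, -1), by simp [hhDirs], by omega, by omega⟩
  · exact ⟨(0, 1), by simp [hhDirs], by omega, by omega⟩

theorem hhFoldA_props (sg : List (List Int)) (h w r c : Int)
    (Hsrc : HReach sg h w r c) :
    ∀ (ds : List (Int × Int)) (st : List (List Bool) × List (Int × Int)),
    hhShape h w st.1 →
    (∀ d ∈ ds, hhAdj r c (r + d.1) (c + d.2)) →
    (hhShape h w (ds.foldl (fun st d => hhRelaxA sg h w st (r + d.1, c + d.2)) st).1
    ∧ (∀ a b, hhVGet st.1 a b = true →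
        hhVGet (ds.foldl (fun st d => hhRelaxA sg h w st (r + d.1, c + d.2)) st).1 a b = true)
    ∧ (∀ p ∈ (ds.foldl (fun st d => hhRelaxA sg h w st (r + d.1, c + d.2)) st).2,
        p ∈ st.2 ∨ HReach sg h w p.1 p.2)
    ∧ (∀ p ∈ st.2, p ∈ (ds.foldl (fun st d => hhRelaxA sg h w st (r + d.1, c + d.2)) st).2)
    ∧ hhUnvis h w (ds.foldl (fun st d => hhRelaxA sg h w st (r + d.1, c + d.2)) st).1
        + (ds.foldl (fun st d => hhRelaxA sg h w st (r + d.1, c + d.2)) st).2.length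
        = hhUnvis h w st.1 + st.2.length
    ∧ (∀ d ∈ ds, hhInR h w (r + d.1) (c + d.2) → hhGetA sg (r + d.1) (c + d.2) = 0 →
        hhVGet (ds.foldl (fun st d => hhRelaxA sg h w st (r + d.1, c + d.2)) st).1
          (r + d.1) (c + d.2) = true)
    ∧ (∀ a b, hhInR h w a b →
        hhVGet (ds.foldl (fun st d => hhRelaxA sg h w st (r + d.1, c + d.2)) st).1 a b = true →
        hhVGet st.1 a b = true ∨
          (a, b) ∈ (ds.foldl (fun st d => hhRelaxA sg h w st (r + d.1, c + d.2)) st).2)) := by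
  intro ds
  induction ds with
  | nil =>
    intro st hsh _
    exact ⟨hsh, fun a b hv => hv, fun p hp => Or.inl hp, fun p hp => hp,
      rfl, fun d hd => absurd hd (List.not_mem_nil), fun a b _ hv => Or.inl hv⟩
  | cons d ds ih =>
    intro st hsh hadj
    simp only [List.foldl_cons]
    set n : Int × Int := (r + d.1, c + d.2) with hn
    have hadjd : hhAdj r c n.1 n.2 := hadj d List.mem_cons_self
    -- single-step facts about st1 := hhRelaxA sg h w st n
    have step :
        hhShape h w (hhRelaxA sg h w st n).1
        ∧ (∀ a b, hhVGet st.1 a b = true → hhVGet (hhRelaxA sg h w st n).1 a b = true)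
        ∧ (∀ p ∈ (hhRelaxA sg h w st n).2, p ∈ st.2 ∨ HReach sg h w p.1 p.2)
        ∧ (∀ p ∈ st.2, p ∈ (hhRelaxA sg h w st n).2)
        ∧ hhUnvis h w (hhRelaxA sg h w st n).1 + (hhRelaxA sg h w st n).2.length
            = hhUnvis h w st.1 + st.2.length
        ∧ (hhInR h w n.1 n.2 → hhGetA sg n.1 n.2 = 0 →
            hhVGet (hhRelaxA sg h w st n).1 n.1 n.2 = true)
        ∧ (∀ a b, hhInR h w a b → hhVGet (hhRelaxA sg h w st n).1 a b = true →
            hhVGet st.1 a b = true ∨ (a, b) ∈ (hhRelaxA sg h w st n).2) := by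
      unfold hhRelaxA
      split_ifs with hg
      · obtain ⟨hg1, hg2, hg3, hg4, hg5, hg6⟩ := hg
        have hin : hhInR h w n.1 n.2 := ⟨hg1, hg2, hg3, hg4⟩
        refine ⟨hhShape_hhVSet h w st.1 n.1 n.2 hsh,
          fun a b hv => hhVGet_hhVSet_mono st.1 n.1 n.2 a b hv, ?_, ?_, ?_, ?_, ?_⟩
        · intro p hp
          rcases List.mem_cons.mp hp with hpn | hps
          · subst hpn
            exact Or.inr (HReach.step r c n.1 n.2 Hsrc hadjd hin hg6)
          · exact Or.inl hps
        · exact fun p hp => List.mem_cons_of_mem _ hp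
        · simp only [List.length_cons]
          have := hhUnvis_hhVSet h w st.1 n.1 n.2 hsh hin hg5
          omega
        · intro _ _
          exact hhVGet_hhVSet_self h w st.1 n.1 n.2 hsh hin
        · intro a b hab hv
          by_cases hne : a.toNat ≠ n.1.toNat ∨ b.toNat ≠ n.2.toNat
          · rw [hhVGet_hhVSet_ne st.1 n.1 n.2 a b hne] at hv
            exact Or.inl hv
          · push_neg at hne
            have : (a, b) = n := by
              obtain ⟨e1, e2⟩ := hne
              obtain ⟨a1, a2, a3, a4⟩ := hab
              obtain ⟨b1, b2, b3, b4⟩ := hin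
              exact Prod.ext (by omega) (by omega)
            exact Or.inr (this ▸ List.mem_cons_self)
      · refine ⟨hsh, fun a b hv => hv, fun p hp => Or.inl hp, fun p hp => hp, rfl, ?_,
          fun a b _ hv => Or.inl hv⟩
        intro hin hbg
        obtain ⟨b1, b2, b3, b4⟩ := hin
        rcases Bool.eq_false_or_eq_true (hhVGet st.1 n.1 n.2) with hv | hv
        · exact hv
        · exact absurd ⟨b1, b2, b3, b4, hv, hbg⟩ hg
    obtain ⟨s1, s2, s3, s4, s5, s6, s7⟩ := step
    have ihr := ih (hhRelaxA sg h w st n) s1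
      (fun d' hd' => hadj d' (List.mem_cons_of_mem _ hd'))
    obtain ⟨i1, i2, i3, i4, i5, i6, i7⟩ := ihr
    refine ⟨i1, fun a b hv => i2 a b (s2 a b hv), ?_, fun p hp => i4 p (s4 p hp), by omega, ?_, ?_⟩
    · intro p hp
      rcases i3 p hp with hp1 | hp2
      · exact s3 p hp1
      · exact Or.inr hp2
    · intro d' hd' hin hbg
      rcases List.mem_cons.mp hd' with rfl | hd's
      · exact i2 _ _ (s6 hin hbg)
      · exact i6 d' hd's hin hbg
    · intro a b hab hv
      rcases i7 a b hab hv with hv1 | hv2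
      · rcases s7 a b hab hv1 with hv3 | hv4
        · exact Or.inl hv3
        · exact Or.inr (i4 _ hv4)
      · exact Or.inr hv2


theorem hhLoopA_props (sg : List (List Int)) (h w : Int) :
    ∀ (fuel : Nat) (v : List (List Bool)) (q : List (Int × Int)),
    hhShape h w v →
    (∀ p ∈ q, HReach sg h w p.1 p.2) →
    (∀ a b, hhInR h w a b → hhVGet v a b = true → HReach sg h w a b) →
    (∀ a b, hhInR h w a b → hhVGet v a b = true →
      (a, b) ∈ q ∨ ∀ a' b', hhAdj a b a' b' → hhInR h w a' b' → hhGetA sg a' b' = 0 →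
        hhVGet v a' b' = true) →
    hhUnvis h w v + q.length ≤ fuel →
    ((∀ a b, hhVGet v a b = true → hhVGet (hhLoopA sg h w fuel v q) a b = true)
    ∧ (∀ a b, hhInR h w a b → hhVGet (hhLoopA sg h w fuel v q) a b = true → HReach sg h w a b)
    ∧ (∀ a b, hhInR h w a b → hhVGet (hhLoopA sg h w fuel v q) a b = true →
        ∀ a' b', hhAdj a b a' b' → hhInR h w a' b' → hhGetA sg a' b' = 0 →
          hhVGet (hhLoopA sg h w fuel v q) a' b' = true)) := by
  intro fuel
  induction fuel with
  | zero =>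
    intro v q hsh hq hsound hclosed hfuel
    cases q with
    | nil =>
      simp only [hhLoopA]
      refine ⟨fun a b hv => hv, hsound, ?_⟩
      intro a b hab hv a' b' hadj hin' hbg
      rcases hclosed a b hab hv with hmem | hcl
      · cases hmem
      · exact hcl a' b' hadj hin' hbg
    | cons p q' => simp at hfuel
  | succ fuel ih =>
    intro v q hsh hq hsound hclosed hfuel
    cases q with
    | nil =>
      simp only [hhLoopA]
      refine ⟨fun a b hv => hv, hsound, ?_⟩
      intro a b hab hv a' b' hadj hin' hbg
      rcases hclosed a b hab hv with hmem | hcl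
      · cases hmem
      · exact hcl a' b' hadj hin' hbg
    | cons p q' =>
      obtain ⟨r, c⟩ := p
      simp only [hhLoopA]
      have Hsrc : HReach sg h w r c := hq (r, c) List.mem_cons_self
      obtain ⟨f1, f2, f3, f4, f5, f6, f7⟩ :=
        hhFoldA_props sg h w r c Hsrc hhDirs (v, q') hsh (hhAdj_hhDirs r c)
      set st := hhDirs.foldl (fun st d => hhRelaxA sg h w st (r + d.1, c + d.2)) (v, q') with hst
      have hq1 : ∀ p ∈ st.2, HReach sg h w p.1 p.2 := by
        intro p hp
        rcases f3 p hp with hp1 | hp2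
        · exact hq p (List.mem_cons_of_mem _ hp1)
        · exact hp2
      have hsound1 : ∀ a b, hhInR h w a b → hhVGet st.1 a b = true → HReach sg h w a b := by
        intro a b hab hv
        rcases f7 a b hab hv with hv1 | hv2
        · exact hsound a b hab hv1
        · exact hq1 (a, b) hv2
      have hclosed1 : ∀ a b, hhInR h w a b → hhVGet st.1 a b = true →
          (a, b) ∈ st.2 ∨ ∀ a' b', hhAdj a b a' b' → hhInR h w a' b' → hhGetA sg a' b' = 0 →
            hhVGet st.1 a' b' = true := by
        intro a b hab hv
        rcases f7 a b hab hv with hv1 | hv2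
        · rcases hclosed a b hab hv1 with hmem | hcl
          · rcases List.mem_cons.mp hmem with heq | hmem'
            · refine Or.inr ?_
              intro a' b' hadj hin' hbg
              have ha : a = r := by simpa using congrArg Prod.fst heq
              have hb : b = c := by simpa using congrArg Prod.snd heq
              subst ha; subst hb
              obtain ⟨d, hd, hd1, hd2⟩ := hhAdj_cover a b a' b' hadj
              rw [hd1, hd2] at hin' hbg ⊢
              exact f6 d hd hin' hbg
            · exact Or.inl (f4 _ hmem')
          · exact Or.inr (fun a' b' hadj hin' hbg => f2 a' b' (hcl a' b' hadj hin' hbg))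
        · exact Or.inl hv2
      have hfuel1 : hhUnvis h w st.1 + st.2.length ≤ fuel := by
        simp only [List.length_cons] at hfuel
        have f5' : hhUnvis h w st.1 + st.2.length = hhUnvis h w v + q'.length := f5
        omega
      obtain ⟨l1, l2, l3⟩ := ih st.1 st.2 f1 hq1 hsound1 hclosed1 hfuel1
      exact ⟨fun a b hv => l1 a b (f2 a b hv), l2, l3⟩


-- proof-side view of the body of A's seeding loop
def hhSeed (sg : List (List Int)) (h w : Int)
    (st : List (List Bool) × List (Int × Int)) (p : Int × Int) :
    List (List Bool) × List (Int × Int) :=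
  if (p.1 = 0 ∨ p.1 = h - 1 ∨ p.2 = 0 ∨ p.2 = w - 1) ∧ hhGetA sg p.1 p.2 = 0 then
    (hhVSet st.1 p.1 p.2, p :: st.2)
  else st

theorem hhInitA_eq (sg : List (List Int)) (h w : Int) :
    hhInitA sg h w = (hhCells h w).foldl (hhSeed sg h w)
      (List.replicate h.toNat (List.replicate w.toNat false), []) := by
  unfold hhInitA hhCells
  rw [List.foldl_flatMap]
  congr 1
  funext st r
  rw [List.foldl_map]
  rfl

theorem hhSeedFold (sg : List (List Int)) (h w : Int) :
    ∀ (l : List (Int × Int)) (st : List (List Bool) × List (Int × Int)),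
    hhShape h w st.1 →
    (∀ p ∈ l, hhInR h w p.1 p.2) →
    (∀ a b, hhInR h w a b → (hhVGet st.1 a b = true ↔ (a, b) ∈ st.2)) →
    (hhShape h w (l.foldl (hhSeed sg h w) st).1
    ∧ (∀ a b, hhInR h w a b →
        (hhVGet (l.foldl (hhSeed sg h w) st).1 a b = true ↔ (a, b) ∈ (l.foldl (hhSeed sg h w) st).2))
    ∧ (∀ p ∈ (l.foldl (hhSeed sg h w) st).2, p ∈ st.2 ∨
        (hhInR h w p.1 p.2 ∧ (p.1 = 0 ∨ p.1 = h - 1 ∨ p.2 = 0 ∨ p.2 = w - 1) ∧ hhGetA sg p.1 p.2 = 0))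
    ∧ (∀ p ∈ l, (p.1 = 0 ∨ p.1 = h - 1 ∨ p.2 = 0 ∨ p.2 = w - 1) → hhGetA sg p.1 p.2 = 0 →
        hhVGet (l.foldl (hhSeed sg h w) st).1 p.1 p.2 = true)
    ∧ (l.foldl (hhSeed sg h w) st).2.length ≤ st.2.length + l.length
    ∧ (∀ a b, hhVGet st.1 a b = true → hhVGet (l.foldl (hhSeed sg h w) st).1 a b = true)) := by
  intro l
  induction l with
  | nil =>
    intro st hsh _ hiff
    exact ⟨hsh, hiff, fun p hp => Or.inl hp, fun p hp => absurd hp (List.not_mem_nil), by simp,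
      fun a b hv => hv⟩
  | cons p l ih =>
    intro st hsh hmem hiff
    have hpin : hhInR h w p.1 p.2 := hmem p List.mem_cons_self
    simp only [List.foldl_cons]
    -- single-step facts
    have step :
        hhShape h w (hhSeed sg h w st p).1
        ∧ (∀ a b, hhInR h w a b →
            (hhVGet (hhSeed sg h w st p).1 a b = true ↔ (a, b) ∈ (hhSeed sg h w st p).2))
        ∧ (∀ q ∈ (hhSeed sg h w st p).2, q ∈ st.2 ∨
            (hhInR h w q.1 q.2 ∧ (q.1 = 0 ∨ q.1 = h - 1 ∨ q.2 = 0 ∨ q.2 = w - 1) ∧ hhGetA sg q.1 q.2 = 0))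
        ∧ ((p.1 = 0 ∨ p.1 = h - 1 ∨ p.2 = 0 ∨ p.2 = w - 1) → hhGetA sg p.1 p.2 = 0 →
            hhVGet (hhSeed sg h w st p).1 p.1 p.2 = true)
        ∧ (hhSeed sg h w st p).2.length ≤ st.2.length + 1
        ∧ (∀ a b, hhVGet st.1 a b = true → hhVGet (hhSeed sg h w st p).1 a b = true) := by
      unfold hhSeed
      split_ifs with hg
      · refine ⟨hhShape_hhVSet h w st.1 p.1 p.2 hsh, ?_, ?_, ?_, by simp,
          fun a b hv => hhVGet_hhVSet_mono st.1 p.1 p.2 a b hv⟩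
        · intro a b hab
          by_cases hne : a.toNat ≠ p.1.toNat ∨ b.toNat ≠ p.2.toNat
          · rw [hhVGet_hhVSet_ne st.1 p.1 p.2 a b hne]
            have hne' : (a, b) ≠ p := by
              rintro rfl
              obtain ⟨_, _, _, _⟩ := hab
              rcases hne with hne | hne <;> simp at hne
            rw [hiff a b hab]
            simp [hne']
          · push_neg at hne
            have heq : (a, b) = p := by
              obtain ⟨e1, e2⟩ := hne
              obtain ⟨a1, a2, a3, a4⟩ := hab
              obtain ⟨b1, b2, b3, b4⟩ := hpin
              exact Prod.ext (by omega) (by omega)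
            subst heq
            simp only [List.mem_cons, true_or, iff_true]
            exact hhVGet_hhVSet_self h w st.1 a b hsh hab
        · intro q hq
          rcases List.mem_cons.mp hq with rfl | hq'
          · exact Or.inr ⟨hpin, hg.1, hg.2⟩
          · exact Or.inl hq'
        · intro _ _
          exact hhVGet_hhVSet_self h w st.1 p.1 p.2 hsh hpin
      · refine ⟨hsh, hiff, fun q hq => Or.inl hq, ?_, by omega, fun a b hv => hv⟩
        intro hb hbg
        exact absurd ⟨hb, hbg⟩ hg
    obtain ⟨s1, s2, s3, s4, s5, s6⟩ := step
    obtain ⟨i1, i2, i3, i4, i5, i6⟩ := ih (hhSeed sg h w st p) s1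
      (fun q hq => hmem q (List.mem_cons_of_mem _ hq)) s2
    refine ⟨i1, i2, ?_, ?_, by simp only [List.length_cons]; omega,
      fun a b hv => i6 a b (s6 a b hv)⟩
    · intro q hq
      rcases i3 q hq with hq1 | hq2
      · exact s3 q hq1
      · exact Or.inr hq2
    · intro q hq hb hbg
      rcases List.mem_cons.mp hq with rfl | hq'
      · -- q = p : seeded now, stays true through the rest of the fold
        exact i6 _ _ (s4 hb hbg)
      · exact i4 q hq' hb hbg


theorem hhA_final (sg : List (List Int)) (h w : Int) (a b : Int) (hab : hhInR h w a b) :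
    (hhVGet (hhLoopA sg h w (2 * h.toNat * w.toNat + 1) (hhInitA sg h w).1 (hhInitA sg h w).2)
      a b = true) ↔ HReach sg h w a b := by
  have hsh0 : hhShape h w (List.replicate h.toNat (List.replicate w.toNat false)) := by
    refine ⟨by simp, ?_⟩
    intro row hrow
    rw [List.eq_of_mem_replicate hrow]
    simp
  have hiff0 : ∀ a b, hhInR h w a b →
      (hhVGet (List.replicate h.toNat (List.replicate w.toNat false)) a b = true ↔
        (a, b) ∈ ([] : List (Int × Int))) := by
    intro a b _
    simp [hhVGet_init]
  obtain ⟨n1, n2, n3, n4, n5, n6⟩ := hhSeedFold sg h w (hhCells h w)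
    (List.replicate h.toNat (List.replicate w.toNat false), [])
    hsh0 (fun p hp => (mem_hhCells h w p).mp hp) hiff0
  rw [← hhInitA_eq sg h w] at n1 n2 n3 n4 n5 n6
  have hq0 : ∀ p ∈ (hhInitA sg h w).2, HReach sg h w p.1 p.2 := by
    intro p hp
    rcases n3 p hp with hp1 | ⟨hin, hb, hbg⟩
    · cases hp1
    · exact HReach.border p.1 p.2 hin hb hbg
  have hsound0 : ∀ a b, hhInR h w a b → hhVGet (hhInitA sg h w).1 a b = true →
      HReach sg h w a b := by
    intro a b hab hv
    exact hq0 (a, b) ((n2 a b hab).mp hv)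
  have hclosed0 : ∀ a b, hhInR h w a b → hhVGet (hhInitA sg h w).1 a b = true →
      (a, b) ∈ (hhInitA sg h w).2 ∨ ∀ a' b', hhAdj a b a' b' → hhInR h w a' b' →
        hhGetA sg a' b' = 0 → hhVGet (hhInitA sg h w).1 a' b' = true := by
    intro a b hab hv
    exact Or.inl ((n2 a b hab).mp hv)
  have hfuel0 : hhUnvis h w (hhInitA sg h w).1 + (hhInitA sg h w).2.length ≤
      2 * h.toNat * w.toNat + 1 := by
    have h1 := hhUnvis_le h w (hhInitA sg h w).1
    have h2 : (hhInitA sg h w).2.length ≤ 0 + (hhCells h w).length := n5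
    rw [length_hhCells h w] at h2
    have hM : 2 * h.toNat * w.toNat = 2 * (h.toNat * w.toNat) := by ring
    rw [hM]
    omega
  obtain ⟨l1, l2, l3⟩ := hhLoopA_props sg h w (2 * h.toNat * w.toNat + 1)
    (hhInitA sg h w).1 (hhInitA sg h w).2 n1 hq0 hsound0 hclosed0 hfuel0
  constructor
  · exact l2 a b hab
  · intro hr
    induction hr with
    | border r c hin hb hbg =>
      exact l1 r c (n4 (r, c) ((mem_hhCells h w (r, c)).mpr hin) hb hbg)
    | step r c r' c' hr hadj hin' hbg ihr =>
      have hin : hhInR h w r c := by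
        clear ihr
        induction hr with
        | border r c hin _ _ => exact hin
        | step _ _ _ _ _ _ hin _ _ => exact hin
      exact l3 r c hin (ihr hin) r' c' hadj hin' hbg


-- proof-side view of the body of B's sweep
def hhStepB (sg : List (List Int)) (h w : Int)
    (S : PySem.Set (Int × Int)) (p : Int × Int) : PySem.Set (Int × Int) :=
  if hhCondB sg h w S p.1 p.2 then PySem.Set.add S p else S

theorem hhSweepB_eq (sg : List (List Int)) (h w : Int) (S : PySem.Set (Int × Int)) :
    hhSweepB sg h w S = (hhCells h w).foldl (hhStepB sg h w) S := by
  unfold hhSweepB hhCells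
  rw [List.foldl_flatMap]
  congr 1
  funext S r
  rw [List.foldl_map]
  rfl

theorem hhCondB_iff (sg : List (List Int)) (h w : Int) (S : PySem.Set (Int × Int)) (r c : Int) :
    hhCondB sg h w S r c = true ↔
      (hhGetA sg r c = 0 ∧ (r, c) ∉ S ∧
        (r = 0 ∨ r = h - 1 ∨ c = 0 ∨ c = w - 1 ∨
         (r - 1, c) ∈ S ∨ (r + 1, c) ∈ S ∨ (r, c - 1) ∈ S ∨ (r, c + 1) ∈ S)) := by
  simp [hhCondB, hhGetB, hhGetA, or_assoc, and_assoc]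

theorem hhStepB_cases (sg : List (List Int)) (h w : Int)
    (S : PySem.Set (Int × Int)) (p : Int × Int) :
    (hhCondB sg h w S p.1 p.2 = true ∧ p ∉ S ∧ hhStepB sg h w S p = S ++ [p]) ∨
    (hhCondB sg h w S p.1 p.2 = false ∧ hhStepB sg h w S p = S) := by
  by_cases hg : hhCondB sg h w S p.1 p.2 = true
  · have hnm : p ∉ S := ((hhCondB_iff sg h w S p.1 p.2).mp hg).2.1
    refine Or.inl ⟨hg, hnm, ?_⟩
    rw [hhStepB, if_pos hg]
    exact PySem.Set.add_of_not_mem hnm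
  · refine Or.inr ⟨by simpa using hg, ?_⟩
    rw [hhStepB, if_neg hg]

theorem hhStepB_extends (sg : List (List Int)) (h w : Int) :
    ∀ (l : List (Int × Int)) (S : PySem.Set (Int × Int)),
    ∃ t, l.foldl (hhStepB sg h w) S = S ++ t := by
  intro l
  induction l with
  | nil => exact fun S => ⟨[], (List.append_nil S).symm⟩
  | cons p l ih =>
    intro S
    simp only [List.foldl_cons]
    rcases hhStepB_cases sg h w S p with ⟨_, _, hst⟩ | ⟨_, hst⟩
    · rw [hst]
      obtain ⟨t, ht⟩ := ih (S ++ [p])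
      exact ⟨[p] ++ t, by rw [ht, List.append_assoc]⟩
    · rw [hst]
      exact ih S

theorem hhFoldB_inv (sg : List (List Int)) (h w : Int) :
    ∀ (l : List (Int × Int)) (S : PySem.Set (Int × Int)),
    (∀ p ∈ l, hhInR h w p.1 p.2) →
    S.Nodup → (∀ p ∈ S, hhInR h w p.1 p.2 ∧ HReach sg h w p.1 p.2) →
    ((l.foldl (hhStepB sg h w) S).Nodup ∧
      ∀ p ∈ l.foldl (hhStepB sg h w) S, hhInR h w p.1 p.2 ∧ HReach sg h w p.1 p.2) := by
  intro l
  induction l with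
  | nil => exact fun S _ hn hm => ⟨hn, hm⟩
  | cons p l ih =>
    intro S hl hn hm
    simp only [List.foldl_cons]
    rcases hhStepB_cases sg h w S p with ⟨hg, hnm, hst⟩ | ⟨hg, hst⟩
    · rw [hst]
      apply ih _ (fun q hq => hl q (List.mem_cons_of_mem _ hq))
      · rw [List.nodup_append]
        refine ⟨hn, List.nodup_singleton p, ?_⟩
        intro a ha b hb
        have : b = p := by simpa using hb
        subst this
        exact fun he => hnm (he ▸ ha)
      · intro q hq
        rcases List.mem_append.mp hq with hq1 | hq2
        · exact hm q hq1
        · have hqp : q = p := by simpa using hq2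
          subst hqp
          obtain ⟨hbg, _, hd⟩ := (hhCondB_iff sg h w S q.1 q.2).mp hg
          have hin : hhInR h w q.1 q.2 := hl q List.mem_cons_self
          refine ⟨hin, ?_⟩
          rcases hd with hb | hb | hb | hb | hb | hb | hb | hb
          · exact HReach.border q.1 q.2 hin (Or.inl hb) hbg
          · exact HReach.border q.1 q.2 hin (Or.inr (Or.inl hb)) hbg
          · exact HReach.border q.1 q.2 hin (Or.inr (Or.inr (Or.inl hb))) hbg
          · exact HReach.border q.1 q.2 hin (Or.inr (Or.inr (Or.inr hb))) hbg
          · exact HReach.step _ _ q.1 q.2 (hm _ hb).2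
              (Or.inr (Or.inl (by constructor <;> simp))) hin hbg
          · exact HReach.step _ _ q.1 q.2 (hm _ hb).2
              (Or.inl (by constructor <;> simp)) hin hbg
          · exact HReach.step _ _ q.1 q.2 (hm _ hb).2
              (Or.inr (Or.inr (Or.inr (by constructor <;> simp)))) hin hbg
          · exact HReach.step _ _ q.1 q.2 (hm _ hb).2
              (Or.inr (Or.inr (Or.inl (by constructor <;> simp)))) hin hbg
    · rw [hst]
      exact ih _ (fun q hq => hl q (List.mem_cons_of_mem _ hq)) hn hm

theorem hhFoldB_fix (sg : List (List Int)) (h w : Int) :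
    ∀ (l : List (Int × Int)) (S : PySem.Set (Int × Int)),
    l.foldl (hhStepB sg h w) S = S →
    ∀ p ∈ l, hhCondB sg h w S p.1 p.2 = false := by
  intro l
  induction l with
  | nil => intro S _ p hp; cases hp
  | cons p l ih =>
    intro S hfix q hq
    simp only [List.foldl_cons] at hfix
    rcases hhStepB_cases sg h w S p with ⟨hg, hnm, hst⟩ | ⟨hg, hst⟩
    · -- impossible: the fold only appends, so S would grow
      exfalso
      rw [hst] at hfix
      obtain ⟨t2, ht2⟩ := hhStepB_extends sg h w l (S ++ [p])
      rw [ht2, List.append_assoc] at hfix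
      have := congrArg List.length hfix
      simp at this
    · rw [hst] at hfix
      rcases List.mem_cons.mp hq with rfl | hq'
      · exact hg
      · exact ih S hfix q hq'


theorem hhB_fix (sg : List (List Int)) (h w : Int) :
    ∀ (n : Nat) (S : PySem.Set (Int × Int)),
    S.Nodup → (∀ p ∈ S, hhInR h w p.1 p.2 ∧ HReach sg h w p.1 p.2) →
    (hhCells h w).length < S.length + n →
    hhSweepB sg h w ((fun S => hhSweepB sg h w S)^[n] S) = (fun S => hhSweepB sg h w S)^[n] S := by
  intro n
  induction n with
  | zero =>
    intro S hn hm hlen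
    exfalso
    have hsub : S ⊆ hhCells h w := by
      intro p hp
      exact (mem_hhCells h w p).mpr (hm p hp).1
    have := (List.subperm_of_subset hn hsub).length_le
    omega
  | succ n ih =>
    intro S hn hm hlen
    by_cases hfix : hhSweepB sg h w S = S
    · rw [Function.iterate_fixed hfix (n + 1), hfix]
    · rw [Function.iterate_succ_apply]
      have hcells : ∀ p ∈ hhCells h w, hhInR h w p.1 p.2 := fun p hp => (mem_hhCells h w p).mp hp
      have hinv := hhFoldB_inv sg h w (hhCells h w) S hcells hn hm
      rw [← hhSweepB_eq sg h w S] at hinv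
      obtain ⟨hn', hm'⟩ := hinv
      apply ih (hhSweepB sg h w S) hn' hm'
      have hext := hhStepB_extends sg h w (hhCells h w) S
      rw [← hhSweepB_eq sg h w S] at hext
      obtain ⟨t, ht⟩ := hext
      have htne : t ≠ [] := by
        intro hte
        rw [hte, List.append_nil] at ht
        exact hfix ht
      have : 1 ≤ t.length := by
        cases t with
        | nil => exact absurd rfl htne
        | cons _ _ => simp
      have := congrArg List.length ht
      simp at this
      omega

theorem hhB_final (sg : List (List Int)) (h w : Int) (hh0 : 0 ≤ h) (hw0 : 0 ≤ w)
    (a b : Int) (hab : hhInR h w a b) :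
    ((a, b) ∈ (PySem.List.pyRange 0 (h * w + 1) 1).foldl
        (fun S _ => hhSweepB sg h w S) (PySem.Set.empty : PySem.Set (Int × Int))
      ↔ HReach sg h w a b) := by
  have hfold : (PySem.List.pyRange 0 (h * w + 1) 1).foldl
      (fun S _ => hhSweepB sg h w S) (PySem.Set.empty : PySem.Set (Int × Int)) =
      (fun S => hhSweepB sg h w S)^[(PySem.List.pyRange 0 (h * w + 1) 1).length]
        PySem.Set.empty :=
    List.foldl_const _ _ _
  have hN : (PySem.List.pyRange 0 (h * w + 1) 1).length = h.toNat * w.toNat + 1 := by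
    rw [PySem.List.length_pyRange_one]
    have hhw : h * w = ((h.toNat * w.toNat : Nat) : Int) := by
      push_cast
      rw [Int.toNat_of_nonneg hh0, Int.toNat_of_nonneg hw0]
    rw [sub_zero, hhw]
    exact_mod_cast rfl
  rw [hfold, hN]
  set N := h.toNat * w.toNat + 1 with hNdef
  set F := (fun S => hhSweepB sg h w S)^[N] (PySem.Set.empty : PySem.Set (Int × Int)) with hF
  have hcells : ∀ p ∈ hhCells h w, hhInR h w p.1 p.2 := fun p hp => (mem_hhCells h w p).mp hp
  have hinv : ∀ k, ((fun S => hhSweepB sg h w S)^[k] (PySem.Set.empty : PySem.Set (Int × Int))).Nodup ∧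
      ∀ p ∈ (fun S => hhSweepB sg h w S)^[k] (PySem.Set.empty : PySem.Set (Int × Int)),
        hhInR h w p.1 p.2 ∧ HReach sg h w p.1 p.2 := by
    intro k
    induction k with
    | zero =>
      refine ⟨List.nodup_nil, ?_⟩
      intro p hp
      cases hp
    | succ k ihk =>
      rw [Function.iterate_succ_apply']
      have := hhFoldB_inv sg h w (hhCells h w) _ hcells ihk.1 ihk.2
      rw [← hhSweepB_eq] at this
      exact this
  have hfix : hhSweepB sg h w F = F := by
    rw [hF]
    apply hhB_fix sg h w N PySem.Set.empty List.nodup_nil (fun p hp => absurd hp (List.not_mem_nil))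
    rw [length_hhCells h w]
    omega
  have hcond : ∀ p ∈ hhCells h w, hhCondB sg h w F p.1 p.2 = false := by
    apply hhFoldB_fix
    rw [← hhSweepB_eq]
    exact hfix
  have hclosed : ∀ r c, hhInR h w r c → hhGetA sg r c = 0 →
      (r = 0 ∨ r = h - 1 ∨ c = 0 ∨ c = w - 1 ∨
       (r - 1, c) ∈ F ∨ (r + 1, c) ∈ F ∨ (r, c - 1) ∈ F ∨ (r, c + 1) ∈ F) →
      (r, c) ∈ F := by
    intro r c hin hbg hd
    by_contra hnm
    have : hhCondB sg h w F r c = true :=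
      (hhCondB_iff sg h w F r c).mpr ⟨hbg, hnm, hd⟩
    rw [hcond (r, c) ((mem_hhCells h w (r, c)).mpr hin)] at this
    cases this
  constructor
  · intro hm
    exact ((hinv N).2 (a, b) hm).2
  · intro hr
    induction hr with
    | border r c hin hb hbg =>
      apply hclosed r c hin hbg
      rcases hb with hb | hb | hb | hb
      · exact Or.inl hb
      · exact Or.inr (Or.inl hb)
      · exact Or.inr (Or.inr (Or.inl hb))
      · exact Or.inr (Or.inr (Or.inr (Or.inl hb)))
    | step r c r' c' hr hadj hin' hbg ihr =>
      have hin : hhInR h w r c := by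
        clear ihr
        induction hr with
        | border r c hin _ _ => exact hin
        | step _ _ _ _ _ _ hin _ _ => exact hin
      have hsrc : (r, c) ∈ F := ihr hin
      apply hclosed r' c' hin' hbg
      rcases hadj with ⟨e1, e2⟩ | ⟨e1, e2⟩ | ⟨e1, e2⟩ | ⟨e1, e2⟩
      · -- r' = r - 1, c' = c : source is (r' + 1, c')
        refine Or.inr (Or.inr (Or.inr (Or.inr (Or.inr (Or.inl ?_)))))
        have : (r' + 1, c') = (r, c) := by rw [e1, e2]; congr 1; omega
        rw [this]; exact hsrc
      · refine Or.inr (Or.inr (Or.inr (Or.inr (Or.inl ?_))))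
        have : (r' - 1, c') = (r, c) := by rw [e1, e2]; congr 1; omega
        rw [this]; exact hsrc
      · refine Or.inr (Or.inr (Or.inr (Or.inr (Or.inr (Or.inr (Or.inr ?_))))))
        have : (r', c' + 1) = (r, c) := by rw [e1, e2]; congr 1; omega
        rw [this]; exact hsrc
      · refine Or.inr (Or.inr (Or.inr (Or.inr (Or.inr (Or.inr (Or.inl ?_))))))
        have : (r', c' - 1) = (r, c) := by rw [e1, e2]; congr 1; omega
        rw [this]; exact hsrc

theorem any_congr_mem {α : Type} (l : List α) (f g : α → Bool)
    (h : ∀ x ∈ l, f x = g x) : l.any f = l.any g := by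
  induction l with
  | nil => rfl
  | cons a t ih =>
    simp only [List.any_cons, h a List.mem_cons_self,
      ih (fun x hx => h x (List.mem_cons_of_mem _ hx))]

-- the else-branches of the two ports, as closed terms
def hhOutA (sg : List (List Int)) (h w : Int) : Bool :=
  (PySem.List.pyRange 0 h 1).any fun r =>
    (PySem.List.pyRange 0 w 1).any fun c =>
      hhGetA sg r c == 0 &&
        !hhVGet (hhLoopA sg h w (2 * h.toNat * w.toNat + 1)
          (hhInitA sg h w).1 (hhInitA sg h w).2) r c

def hhOutB (sg : List (List Int)) (h w : Int) : Bool :=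
  (PySem.List.pyRange 0 h 1).any fun r =>
    (PySem.List.pyRange 0 w 1).any fun c =>
      hhGetB sg r c == 0 &&
        !(PySem.Set.contains ((PySem.List.pyRange 0 (h * w + 1) 1).foldl
          (fun S _ => hhSweepB sg h w S) PySem.Set.empty) (r, c))

theorem hhOut_eq (sg : List (List Int)) (h w : Int) (hh2 : 2 < h) (hw2 : 2 < w) :
    hhOutA sg h w = hhOutB sg h w := by
  have hh0 : (0 : Int) ≤ h := by omega
  have hw0 : (0 : Int) ≤ w := by omega
  unfold hhOutA hhOutB
  apply any_congr_mem
  intro r hr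
  have hr' := (PySem.List.mem_pyRange_one).mp hr
  apply any_congr_mem
  intro c hc
  have hc' := (PySem.List.mem_pyRange_one).mp hc
  have hin : hhInR h w r c := ⟨hr'.1, hr'.2, hc'.1, hc'.2⟩
  have hA := hhA_final sg h w r c hin
  have hB := hhB_final sg h w hh0 hw0 r c hin
  have hgeq : hhGetB sg r c = hhGetA sg r c := rfl
  rw [hgeq]
  by_cases hbg : hhGetA sg r c = 0
  · simp only [hbg, beq_self_eq_true, Bool.true_and]
    apply congrArg
    apply Bool.coe_iff_coe.mp
    rw [PySem.Set.contains_iff]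
    rw [hA, hB]
  · have hne : (hhGetA sg r c == 0) = false := by simpa using hbg
    rw [hne, Bool.false_and, Bool.false_and]

theorem has_hole_py_eq_alt (shape : List (String × List (List Int))) :
    has_hole_py shape = has_hole_py_alt shape := by
  show (if ((((shape.find? (fun p => p.1 == "subgrid")).map (·.2)).getD [] : List (List Int)).length : Int) ≤ 2 ∨
        (if (((shape.find? (fun p => p.1 == "subgrid")).map (·.2)).getD [] : List (List Int)) ≠ [] then
          (((((shape.find? (fun p => p.1 == "subgrid")).map (·.2)).getD [] : List (List Int)).headD []).length : Int) else 0) ≤ 2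
      then false
      else hhOutA (((shape.find? (fun p => p.1 == "subgrid")).map (·.2)).getD [])
        ((((shape.find? (fun p => p.1 == "subgrid")).map (·.2)).getD [] : List (List Int)).length : Int)
        (if (((shape.find? (fun p => p.1 == "subgrid")).map (·.2)).getD [] : List (List Int)) ≠ [] then
          (((((shape.find? (fun p => p.1 == "subgrid")).map (·.2)).getD [] : List (List Int)).headD []).length : Int) else 0)) =
    (if ((((shape.find? (fun p => p.1 == "subgrid")).map (·.2)).getD [] : List (List Int)).length : Int) ≤ 2 ∨
        (if (((shape.find? (fun p => p.1 == "subgrid")).map (·.2)).getD [] : List (List Int)) ≠ [] then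
          (((((shape.find? (fun p => p.1 == "subgrid")).map (·.2)).getD [] : List (List Int)).headD []).length : Int) else 0) ≤ 2
      then false
      else hhOutB (((shape.find? (fun p => p.1 == "subgrid")).map (·.2)).getD [])
        ((((shape.find? (fun p => p.1 == "subgrid")).map (·.2)).getD [] : List (List Int)).length : Int)
        (if (((shape.find? (fun p => p.1 == "subgrid")).map (·.2)).getD [] : List (List Int)) ≠ [] then
          (((((shape.find? (fun p => p.1 == "subgrid")).map (·.2)).getD [] : List (List Int)).headD []).length : Int) else 0))
  split_ifs with h1 h2 h3
  all_goals try rfl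
  · -- sg ≠ [], grid larger than 2×2 in both directions
    push_neg at h2
    exact hhOut_eq _ _ _ (by omega) (by omega)


-- ===== VERDICT (by name: the statement is the Claim_ definition above) =====
theorem has_hole_py_spec : Claim_equal_has_hole_py := by
  intro shape _ _
  unfold Spec_has_hole_py
  exact has_hole_py_eq_alt shape
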